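-- pv_equiv track=rewrite | github.com/CR1337/b14-automation | lib/auto_text/util.py | enumerate_terms
-- ===== SOURCE A (Python) =====
-- from typing import List
--
-- def enumerate_terms(terms: List[str], language: str = "de", max_terms: int = -1) -> str:
--     if max_terms >= 0:
--         terms = terms[:max_terms]
--     match language:
--         case "en":
--             and_ = "and"
--             as_well_as = "as well as"
--
--         case _:
--             and_ = "und"
--             as_well_as = "sowie"
--
--     match len(terms):
--         case 0:
--             return ""
--
--         case 1:
--             return terms[0]
--
--         case 2:
--             return f"{terms[0]} {and_} {terms[1]}"
--
--         case 3:
--             return f"{terms[0]} {and_} {terms[1]} {as_well_as} {terms[2]}"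
--
--         case 4:
--             return f"{terms[0]} {and_} {terms[1]} {as_well_as} {terms[2]} {and_} {terms[3]}"
--
--         case _:
--             return f"{', '.join(t for t in terms[:-1])} {and_} {terms[-1]}"
-- ===== SOURCE B (Python) =====
-- from typing import List
--
-- def enumerate_terms(terms: List[str], language: str = "de", max_terms: int = -1) -> str:
--     if max_terms >= 0:
--         terms = terms[:max_terms]
--     and_, as_well_as = ("and", "as well as") if language == "en" else ("und", "sowie")
--     n = len(terms)
--     if n <= 4:
--         seps = [" " + c + " " for c in [and_, as_well_as, and_, as_well_as]][:max(n - 1, 0)]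
--     else:
--         seps = [", "] * (n - 2) + [" " + and_ + " "]
--     out = ""
--     for t, s in zip(terms, seps + [""]):
--         out += t + s
--     return out
-- ===== Notes on version B (the rewrite author's own statement) =====
-- stated objective: alternative
-- what changed: Instead of A's five hard-coded format templates, B first builds a separator LIST (a slice of the pattern [and_, as_well_as, and_, as_well_as] for up to 4 terms, or (n-2) commas plus one and_ for 5+), then assembles the phrase by one uniform interleave of terms with that list, the same assembly for every length.
import Mathlib
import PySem

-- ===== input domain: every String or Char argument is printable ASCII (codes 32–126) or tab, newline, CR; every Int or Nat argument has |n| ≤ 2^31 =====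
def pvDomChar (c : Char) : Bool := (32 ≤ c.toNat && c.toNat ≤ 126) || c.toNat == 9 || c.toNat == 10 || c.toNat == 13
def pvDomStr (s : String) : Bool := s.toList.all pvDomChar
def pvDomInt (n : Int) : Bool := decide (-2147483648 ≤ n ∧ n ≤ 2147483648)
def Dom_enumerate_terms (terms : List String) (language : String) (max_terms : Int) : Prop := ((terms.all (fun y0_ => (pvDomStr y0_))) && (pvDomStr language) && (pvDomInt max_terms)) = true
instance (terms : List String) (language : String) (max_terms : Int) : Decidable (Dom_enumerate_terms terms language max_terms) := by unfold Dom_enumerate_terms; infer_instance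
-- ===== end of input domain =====

-- B builds a separator list first (pattern slice for ≤4 terms, commas+and_ for 5+) and then
-- assembles every phrase by one uniform interleave of terms with separators (objective: alternative).

-- ===== PORT A =====
def enumerate_terms (terms : List String) (language : String) (max_terms : Int) : String :=
  let terms := if max_terms ≥ 0 then PySem.List.slice terms none (some max_terms) else terms
  let and_ : String := if language == "en" then "and" else "und"
  let as_well_as : String := if language == "en" then "as well as" else "sowie"
  match terms with
  | [] => ""
  | [t0] => t0
  | [t0, t1] => t0 ++ " " ++ and_ ++ " " ++ t1
  | [t0, t1, t2] => t0 ++ " " ++ and_ ++ " " ++ t1 ++ " " ++ as_well_as ++ " " ++ t2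
  | [t0, t1, t2, t3] => t0 ++ " " ++ and_ ++ " " ++ t1 ++ " " ++ as_well_as ++ " " ++ t2 ++ " " ++ and_ ++ " " ++ t3
  | _ => PySem.Str.join ", " (PySem.List.slice terms none (some (-1))) ++ " " ++ and_ ++ " " ++ PySem.List.pyGetD terms (-1) ""

-- ===== PORT B =====
def enumerate_terms_alt (terms : List String) (language : String) (max_terms : Int) : String :=
  let terms := if max_terms ≥ 0 then PySem.List.slice terms none (some max_terms) else terms
  let and_ : String := if language == "en" then "and" else "und"
  let as_well_as : String := if language == "en" then "as well as" else "sowie"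
  let n : Int := terms.length
  let seps : List String :=
    if n ≤ 4 then
      PySem.List.slice (([and_, as_well_as, and_, as_well_as]).map (fun c => " " ++ c ++ " ")) none (some (max (n - 1) 0))
    else
      List.replicate (n - 2).toNat ", " ++ [" " ++ and_ ++ " "]
  (terms.zip (seps ++ [""])).foldl (fun out p => out ++ p.1 ++ p.2) ""

-- ===== PRECONDITION & SPEC =====
def Spec_enumerate_terms (terms : List String) (language : String) (max_terms : Int) (out : String) : Prop := out = enumerate_terms_alt terms language max_terms
instance (terms : List String) (language : String) (max_terms : Int) (out : String) : Decidable (Spec_enumerate_terms terms language max_terms out) := by unfold Spec_enumerate_terms; infer_instance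

-- ===== CLAIM (what is proved, stated in full; the proofs are below) =====
def Claim_equal_enumerate_terms : Prop := ∀ (terms : List String) (language : String) (max_terms : Int), Dom_enumerate_terms terms language max_terms → Spec_enumerate_terms terms language max_terms (enumerate_terms terms language max_terms)

-- ===== LEMMAS AND PROOFS =====

-- ", ".join over a cons-cons list peels its head
theorem pv_join_cons_cons (x y : String) (l : List String) :
    PySem.Str.join ", " (x :: y :: l) = x ++ ", " ++ PySem.Str.join ", " (y :: l) := by
  simp [PySem.Str.join, PySem.Chars.join, List.intercalate]
  rw [show (", " : String) = String.ofList [',', ' '] from rfl, String.append_assoc,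
      ← String.ofList_append]
  rfl

-- B's interleave fold over terms zipped with (n-2) commas, one connector and a trailing "" equals A's comma-join form
theorem pv_interleave (sepA : String) :
    ∀ (mid : List String) (t0 z acc : String),
      (((t0 :: (mid ++ [z])).zip ((List.replicate mid.length ", " ++ [sepA]) ++ [""])).foldl
          (fun out p => out ++ p.1 ++ p.2) acc)
        = acc ++ PySem.Str.join ", " (t0 :: mid) ++ sepA ++ z := by
  intro mid
  induction mid with
  | nil =>
      intro t0 z acc
      simp [PySem.Str.join, PySem.Chars.join, List.intercalate]
  | cons r rs ih =>
      intro t0 z acc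
      simp only [List.length_cons, List.replicate_succ, List.cons_append, List.zip_cons_cons,
        List.foldl_cons]
      rw [ih r z (acc ++ t0 ++ ", "), pv_join_cons_cons]
      simp [String.append_assoc]

-- the two ports' cores agree for every list shape
theorem pv_core_eq (ts : List String) (a w : String) :
    (match ts with
     | [] => ""
     | [t0] => t0
     | [t0, t1] => t0 ++ " " ++ a ++ " " ++ t1
     | [t0, t1, t2] => t0 ++ " " ++ a ++ " " ++ t1 ++ " " ++ w ++ " " ++ t2
     | [t0, t1, t2, t3] => t0 ++ " " ++ a ++ " " ++ t1 ++ " " ++ w ++ " " ++ t2 ++ " " ++ a ++ " " ++ t3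
     | _ => PySem.Str.join ", " (PySem.List.slice ts none (some (-1))) ++ " " ++ a ++ " " ++ PySem.List.pyGetD ts (-1) "") =
    (let n : Int := ts.length
     let seps : List String :=
       if n ≤ 4 then
         PySem.List.slice (([a, w, a, w]).map (fun c => " " ++ c ++ " ")) none (some (max (n - 1) 0))
       else
         List.replicate (n - 2).toNat ", " ++ [" " ++ a ++ " "]
     (ts.zip (seps ++ [""])).foldl (fun out p => out ++ p.1 ++ p.2) "") := by
  match ts with
  | [] => rfl
  | [t0] => norm_num [PySem.List.slice]
  | [t0, t1] =>
      norm_num [PySem.List.slice, show Int.toNat 1 = 1 from rfl, List.take_succ_cons,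
        String.append_assoc]
  | [t0, t1, t2] =>
      norm_num [PySem.List.slice, show Int.toNat 2 = 2 from rfl, List.take_succ_cons,
        String.append_assoc]
  | [t0, t1, t2, t3] =>
      norm_num [PySem.List.slice, show Int.toNat 3 = 3 from rfl, List.take_succ_cons,
        String.append_assoc]
  | t0 :: t1 :: t2 :: t3 :: t4 :: rest =>
      obtain ⟨mid, z, hmz⟩ :=
        (List.eq_nil_or_concat' (t1 :: t2 :: t3 :: t4 :: rest)).resolve_left (by simp)
      have hmid : 3 ≤ mid.length := by
        have := congrArg List.length hmz
        simp at this
        omega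
      show PySem.Str.join ", " (PySem.List.slice (t0 :: t1 :: t2 :: t3 :: t4 :: rest) none
            (some (-1))) ++ " " ++ a ++ " " ++
          PySem.List.pyGetD (t0 :: t1 :: t2 :: t3 :: t4 :: rest) (-1) "" = _
      rw [hmz]
      have hA1 : PySem.List.slice (t0 :: (mid ++ [z])) none (some (-1)) = t0 :: mid := by
        rw [show t0 :: (mid ++ [z]) = (t0 :: mid) ++ [z] by simp,
          PySem.List.slice_to_neg_one, List.dropLast_concat]
      have hA2 : PySem.List.pyGetD (t0 :: (mid ++ [z])) (-1) "" = z := by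
        rw [show t0 :: (mid ++ [z]) = (t0 :: mid) ++ [z] by simp,
          PySem.List.pyGetD_neg_one_append_singleton]
      have h4 : ¬ ((((t0 :: (mid ++ [z])).length : Nat) : Int) ≤ 4) := by
        simp
        omega
      have hrep : ((((t0 :: (mid ++ [z])).length : Nat) : Int) - 2).toNat = mid.length := by
        simp
        omega
      simp only [hA1, hA2, if_neg h4, hrep]
      rw [pv_interleave (" " ++ a ++ " ") mid t0 z ""]
      simp [String.append_assoc]

-- ===== VERDICT (by name: the statement is the Claim_ definition above) =====
theorem enumerate_terms_spec : Claim_equal_enumerate_terms := by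
  intro terms language max_terms _
  unfold Spec_enumerate_terms enumerate_terms enumerate_terms_alt
  exact pv_core_eq _ _ _
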